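-- pv_equiv track=rewrite | github.com/mckaysmith27/frontline_watcher | frontline_watcher.py | pick_job_key_lines
-- ===== SOURCE A (Python) =====
-- WEEKDAY_WORDS = ["Mon,", "Tue,", "Wed,", "Thu,", "Fri,", "Sat,", "Sun,"]
--
-- def pick_job_key_lines(job_block: str, max_lines: int = 3) -> list[str]:
--     lines = [ln.strip() for ln in job_block.splitlines() if ln.strip()]
--
--     def score(line: str) -> int:
--         s = 0
--         if any(w in line for w in WEEKDAY_WORDS):
--             s += 5
--         if (" AM" in line) or (" PM" in line):
--             s += 4
--         if any(tok in line for tok in ["Elementary", "Middle", "High School", "Teacher", "Grade"]):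
--             s += 3
--         if len(line) >= 12:
--             s += 1
--         return s
--
--     scored = sorted(lines, key=score, reverse=True)
--     picked: list[str] = []
--     for ln in scored:
--         if ln not in picked:
--             picked.append(ln)
--         if len(picked) >= max_lines:
--             break
--
--     if not picked and lines:
--         picked = lines[:1]
--
--     return picked
-- ===== SOURCE B (Python) =====
-- WEEKDAY_WORDS = ["Mon,", "Tue,", "Wed,", "Thu,", "Fri,", "Sat,", "Sun,"]
--
-- def pick_job_key_lines(job_block: str, max_lines: int = 3) -> list[str]:
--     lines = [ln.strip() for ln in job_block.splitlines() if ln.strip()]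
--
--     def score(line: str) -> int:
--         s = 0
--         if any(w in line for w in WEEKDAY_WORDS):
--             s += 5
--         if (" AM" in line) or (" PM" in line):
--             s += 4
--         if any(tok in line for tok in ["Elementary", "Middle", "High School", "Teacher", "Grade"]):
--             s += 3
--         if len(line) >= 12:
--             s += 1
--         return s
--
--     # Bucket sort: scores are bounded (0..13), so group lines by score in one
--     # pass and walk the buckets from best to worst (stable by construction).
--     buckets: dict[int, list[str]] = {}
--     for ln in lines:
--         buckets[score(ln)] = buckets.get(score(ln), []) + [ln]
--
--     picked: list[str] = []
--     for s in range(13, -1, -1):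
--         for ln in buckets.get(s, []):
--             if ln not in picked:
--                 picked.append(ln)
--             if len(picked) >= max_lines:
--                 return picked
--
--     if not picked and lines:
--         picked = lines[:1]
--     return picked
-- ===== Notes on version B (the rewrite author's own statement) =====
-- stated objective: alternative
-- what changed: Replaces the comparison sort of lines by score with a single-pass bucket grouping (dict keyed by the bounded 0..13 score) walked from highest to lowest score, feeding the same distinct-pick loop with an early return.
import Mathlib
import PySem

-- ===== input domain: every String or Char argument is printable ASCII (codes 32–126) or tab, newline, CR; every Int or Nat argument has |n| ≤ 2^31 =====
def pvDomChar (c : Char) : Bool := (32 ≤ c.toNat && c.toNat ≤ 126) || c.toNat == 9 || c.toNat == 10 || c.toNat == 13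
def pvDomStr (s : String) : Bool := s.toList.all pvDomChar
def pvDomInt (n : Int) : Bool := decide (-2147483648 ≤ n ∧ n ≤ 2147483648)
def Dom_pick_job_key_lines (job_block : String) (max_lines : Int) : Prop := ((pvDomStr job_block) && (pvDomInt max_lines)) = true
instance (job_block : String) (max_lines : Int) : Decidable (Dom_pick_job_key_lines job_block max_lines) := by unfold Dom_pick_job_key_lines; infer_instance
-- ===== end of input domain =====

-- B replaces the comparison sort over lines by a bucket sort over the bounded score
-- range (one grouping pass, then buckets walked best-to-worst); same pick loop; alternative decomposition.

-- ===== PORT A =====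
def WEEKDAY_WORDS : List String := ["Mon,", "Tue,", "Wed,", "Thu,", "Fri,", "Sat,", "Sun,"]

-- the inner `score` helper (identical code in A and in B)
def pjkl_score (line : String) : Int :=
  let s : Int := 0
  let s := if WEEKDAY_WORDS.any (fun w => PySem.Str.isIn w line) then s + 5 else s
  let s := if PySem.Str.isIn " AM" line || PySem.Str.isIn " PM" line then s + 4 else s
  let s := if ["Elementary", "Middle", "High School", "Teacher", "Grade"].any
      (fun tok => PySem.Str.isIn tok line) then s + 3 else s
  let s := if 12 ≤ PySem.Str.len line then s + 1 else s
  s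

-- lines = [ln.strip() for ln in job_block.splitlines() if ln.strip()]
def pjkl_lines (job_block : String) : List String :=
  ((PySem.Str.splitlines job_block).filter (fun ln => PySem.Str.strip ln ≠ "")).map PySem.Str.strip

-- A's pick loop: for ln in scored: append if distinct; break once len(picked) >= max_lines
def pjkl_pickA (max_lines : Int) : List String → List String → List String
  | [], picked => picked
  | ln :: rest, picked =>
      let p := if picked.contains ln then picked else picked ++ [ln]
      if max_lines ≤ (p.length : Int) then p else pjkl_pickA max_lines rest p

def pick_job_key_lines (job_block : String) (max_lines : Int) : List String :=
  let lines := pjkl_lines job_block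
  let scored := PySem.List.sorted lines pjkl_score true
  let picked := pjkl_pickA max_lines scored []
  if picked.isEmpty && !lines.isEmpty then lines.take 1 else picked

-- ===== PORT B =====
-- inner loop over one bucket; .inl = early `return picked`
def pjkl_innerB (max_lines : Int) : List String → List String → List String ⊕ List String
  | [], picked => .inr picked
  | ln :: rest, picked =>
      let p := if picked.contains ln then picked else picked ++ [ln]
      if max_lines ≤ (p.length : Int) then .inl p else pjkl_innerB max_lines rest p

-- outer loop `for s in range(13, -1, -1)` over the bucket dict
def pjkl_outerB (max_lines : Int) (buckets : PySem.Dict Int (List String)) :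
    List Int → List String → List String ⊕ List String
  | [], picked => .inr picked
  | s :: rest, picked =>
      match pjkl_innerB max_lines (buckets.getD s []) picked with
      | .inl r => .inl r
      | .inr p => pjkl_outerB max_lines buckets rest p

def pick_job_key_lines_alt (job_block : String) (max_lines : Int) : List String :=
  let lines := pjkl_lines job_block
  -- buckets[score(ln)] = buckets.get(score(ln), []) + [ln]
  let buckets := lines.foldl (fun d ln => d.modify (pjkl_score ln) [] (· ++ [ln])) PySem.Dict.empty
  match pjkl_outerB max_lines buckets (PySem.List.pyRange 13 (-1) (-1)) [] with
  | .inl r => r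
  | .inr picked => if picked.isEmpty && !lines.isEmpty then lines.take 1 else picked

-- ===== PRECONDITION & SPEC =====
def Spec_pick_job_key_lines (job_block : String) (max_lines : Int) (out : List String) : Prop := out = pick_job_key_lines_alt job_block max_lines
instance (job_block : String) (max_lines : Int) (out : List String) : Decidable (Spec_pick_job_key_lines job_block max_lines out) := by unfold Spec_pick_job_key_lines; infer_instance

-- ===== CLAIM (what is proved, stated in full; the proofs are below) =====
def Claim_equal_pick_job_key_lines : Prop := ∀ (job_block : String) (max_lines : Int), Dom_pick_job_key_lines job_block max_lines → Spec_pick_job_key_lines job_block max_lines (pick_job_key_lines job_block max_lines)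

-- ===== LEMMAS AND PROOFS =====

-- every score lies in the bucket range 13,12,…,0
lemma pjkl_score_mem (ln : String) : pjkl_score ln ∈ PySem.List.pyRange 13 (-1) (-1) := by
  unfold pjkl_score
  split_ifs <;> decide

-- the grouping fold looked up at s is exactly the stable bucket of s
lemma pjkl_bucket_getD (lines : List String) (s : Int) :
    (lines.foldl (fun d ln => d.modify (pjkl_score ln) [] (· ++ [ln])) PySem.Dict.empty).getD s []
      = lines.filter (fun ln => pjkl_score ln == s) := by
  have h : lines.foldl (fun d ln => d.modify (pjkl_score ln) [] (· ++ [ln])) PySem.Dict.empty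
      = (lines.map (fun ln => (pjkl_score ln, ln))).foldl
          (fun d p => d.modify p.1 [] (· ++ [p.2])) PySem.Dict.empty := by
    rw [List.foldl_map]
  rw [h, PySem.Dict.getD_foldl_modify_append, List.filter_map]
  simp [Function.comp_def]

-- insertBy walks past a block it does not go before
lemma pjkl_insertBy_append (before : String → String → Bool) (x : String) (B rest : List String)
    (h : ∀ y ∈ B, before x y = false) :
    PySem.List.insertBy before x (B ++ rest) = B ++ PySem.List.insertBy before x rest := by
  induction B with
  | nil => rfl
  | cons y B ih =>
      have hy := h y (by simp)
      simp only [List.cons_append, PySem.List.insertBy, hy, Bool.false_eq_true, if_false]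
      exact congrArg (y :: ·) (ih (fun z hz => h z (by simp [hz])))

lemma pjkl_insertBy_all_before (before : String → String → Bool) (x : String) (rest : List String)
    (h : ∀ y ∈ rest, before x y = true) :
    PySem.List.insertBy before x rest = x :: rest := by
  cases rest with
  | nil => rfl
  | cons y t => simp [PySem.List.insertBy, h y (by simp)]

-- inserting x into a bucket concatenation appends it to the end of its own bucket
lemma pjkl_insert_buckets (x : String) (xs : List String) :
    ∀ (ss : List Int), ss.Pairwise (· > ·) → pjkl_score x ∈ ss →
    PySem.List.insertBy (fun a b => decide (pjkl_score b < pjkl_score a)) x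
        (ss.flatMap (fun s => xs.filter (fun y => pjkl_score y == s)))
      = ss.flatMap (fun s => (xs ++ [x]).filter (fun y => pjkl_score y == s)) := by
  intro ss hp hx
  induction ss with
  | nil => simp at hx
  | cons s ss ih =>
      have hgt : ∀ t ∈ ss, s > t := fun t ht => List.rel_of_pairwise_cons hp ht
      have hp' : ss.Pairwise (· > ·) := hp.of_cons
      simp only [List.flatMap_cons, List.filter_append]
      by_cases hks : pjkl_score x = s
      · -- x lands in the first bucket
        have hB : ∀ y ∈ xs.filter (fun y => pjkl_score y == s),
            (fun a b => decide (pjkl_score b < pjkl_score a)) x y = false := by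
          intro y hy
          have := (List.mem_filter.mp hy).2
          simp at this ⊢
          omega
        have hrest : ∀ y ∈ ss.flatMap (fun t => xs.filter (fun y => pjkl_score y == t)),
            (fun a b => decide (pjkl_score b < pjkl_score a)) x y = true := by
          intro y hy
          obtain ⟨t, ht, hy⟩ := List.mem_flatMap.mp hy
          have h1 := (List.mem_filter.mp hy).2
          have h2 := hgt t ht
          simp at h1 ⊢
          omega
        have hfl : ss.flatMap (fun t => xs.filter (fun y => pjkl_score y == t)
                ++ [x].filter (fun y => pjkl_score y == t))
            = ss.flatMap (fun t => xs.filter (fun y => pjkl_score y == t)) := by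
          rw [List.flatMap_def, List.flatMap_def]
          congr 1
          apply List.map_congr_left
          intro t ht
          have h2 := hgt t ht
          simp
          omega
        rw [pjkl_insertBy_append _ _ _ _ hB, pjkl_insertBy_all_before _ _ _ hrest]
        have h1 : [x].filter (fun y => pjkl_score y == s) = [x] := by simp [hks]
        rw [hfl, h1]
        simp
      · -- x lands in a later bucket
        have hx' : pjkl_score x ∈ ss := by
          rcases List.mem_cons.mp hx with h | h
          · exact absurd h hks
          · exact h
        have hxs : pjkl_score x < s := hgt _ hx'
        have hB : ∀ y ∈ xs.filter (fun y => pjkl_score y == s),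
            (fun a b => decide (pjkl_score b < pjkl_score a)) x y = false := by
          intro y hy
          have := (List.mem_filter.mp hy).2
          simp at this ⊢
          omega
        rw [pjkl_insertBy_append _ _ _ _ hB, ih hp' hx']
        have h1 : [x].filter (fun y => pjkl_score y == s) = [] := by simp; omega
        rw [h1]
        simp [List.filter_append]

-- the stable reverse sort by score IS the bucket concatenation, best score first
lemma pjkl_sorted_eq_buckets (xs : List String) :
    PySem.List.sorted xs pjkl_score true
      = (PySem.List.pyRange 13 (-1) (-1)).flatMap (fun s => xs.filter (fun y => pjkl_score y == s)) := by
  induction xs using List.reverseRecOn with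
  | nil =>
      rw [PySem.List.sorted_rev_eq_foldl_insertBy]
      simp
  | append_singleton xs x ih =>
      rw [PySem.List.sorted_rev_eq_foldl_insertBy, List.foldl_append, List.foldl_cons, List.foldl_nil,
        ← PySem.List.sorted_rev_eq_foldl_insertBy, ih]
      exact pjkl_insert_buckets x xs _ (by decide) (pjkl_score_mem x)

-- A's pick loop over a concatenation factors through B's inner loop
lemma pjkl_pickA_append (max_lines : Int) (b : List String) :
    ∀ (rest picked : List String),
    pjkl_pickA max_lines (b ++ rest) picked
      = (match pjkl_innerB max_lines b picked with
         | .inl r => r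
         | .inr p => pjkl_pickA max_lines rest p) := by
  induction b with
  | nil => intro rest picked; rfl
  | cons ln b ih =>
      intro rest picked
      simp only [List.cons_append, pjkl_pickA, pjkl_innerB]
      split <;> split <;> first | rfl | exact ih rest _

-- an early return is never empty
lemma pjkl_innerB_inl_ne_nil (max_lines : Int) :
    ∀ (b picked r : List String), pjkl_innerB max_lines b picked = .inl r → r ≠ [] := by
  intro b
  induction b with
  | nil => intro picked r h; simp [pjkl_innerB] at h
  | cons ln rest ih =>
      intro picked r h
      simp only [pjkl_innerB] at h
      by_cases hc : picked.contains ln = true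
      · rw [if_pos hc] at h
        by_cases hm : max_lines ≤ (picked.length : Int)
        · rw [if_pos hm] at h
          cases h
          intro hnil; subst hnil; simp at hc
        · rw [if_neg hm] at h
          exact ih _ _ h
      · rw [if_neg hc] at h
        by_cases hm : max_lines ≤ ((picked ++ [ln]).length : Int)
        · rw [if_pos hm] at h
          cases h
          simp
        · rw [if_neg hm] at h
          exact ih _ _ h

-- B's outer loop agrees with A's pick loop on the flattened buckets
lemma pjkl_outer_eq (max_lines : Int) (buckets : PySem.Dict Int (List String))
    (f : Int → List String) (hb : ∀ s, buckets.getD s [] = f s) :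
    ∀ (ss : List Int) (picked : List String),
    (∀ r, pjkl_outerB max_lines buckets ss picked = .inl r →
        r = pjkl_pickA max_lines (ss.flatMap f) picked ∧ r ≠ []) ∧
    (∀ p, pjkl_outerB max_lines buckets ss picked = .inr p →
        p = pjkl_pickA max_lines (ss.flatMap f) picked) := by
  intro ss
  induction ss with
  | nil =>
      intro picked
      constructor
      · intro r h; simp [pjkl_outerB] at h
      · intro p h
        simp only [pjkl_outerB] at h
        cases h
        rfl
  | cons s ss ih =>
      intro picked
      have hsplit : pjkl_pickA max_lines ((s :: ss).flatMap f) picked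
          = (match pjkl_innerB max_lines (f s) picked with
             | .inl r => r
             | .inr p => pjkl_pickA max_lines (ss.flatMap f) p) := by
        rw [List.flatMap_cons]
        exact pjkl_pickA_append max_lines (f s) (ss.flatMap f) picked
      constructor
      · intro r h
        simp only [pjkl_outerB, hb] at h
        cases hinner : pjkl_innerB max_lines (f s) picked with
        | inl q =>
            rw [hinner] at h
            cases h
            refine ⟨?_, pjkl_innerB_inl_ne_nil max_lines _ _ _ hinner⟩
            rw [hsplit, hinner]
        | inr p =>
            rw [hinner] at h
            rcases (ih p).1 r h with ⟨h1, h2⟩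
            refine ⟨?_, h2⟩
            rw [hsplit, hinner]
            exact h1
      · intro p h
        simp only [pjkl_outerB, hb] at h
        cases hinner : pjkl_innerB max_lines (f s) picked with
        | inl q => rw [hinner] at h; cases h
        | inr q =>
            rw [hinner] at h
            rw [hsplit, hinner]
            exact (ih q).2 p h

-- ===== VERDICT (by name: the statement is the Claim_ definition above) =====
theorem pick_job_key_lines_spec : Claim_equal_pick_job_key_lines := by
  intro job_block max_lines _
  unfold Spec_pick_job_key_lines pick_job_key_lines pick_job_key_lines_alt
  simp only []
  set L := pjkl_lines job_block with hL
  set D := L.foldl (fun d ln => d.modify (pjkl_score ln) [] (· ++ [ln])) PySem.Dict.empty with hD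
  have hb : ∀ s, D.getD s [] = L.filter (fun ln => pjkl_score ln == s) := fun s => pjkl_bucket_getD L s
  have houter := pjkl_outer_eq max_lines D (fun s => L.filter (fun ln => pjkl_score ln == s)) hb
      (PySem.List.pyRange 13 (-1) (-1)) []
  have hsort : PySem.List.sorted L pjkl_score true
      = (PySem.List.pyRange 13 (-1) (-1)).flatMap (fun s => L.filter (fun ln => pjkl_score ln == s)) :=
    pjkl_sorted_eq_buckets L
  cases hres : pjkl_outerB max_lines D (PySem.List.pyRange 13 (-1) (-1)) [] with
  | inl r =>
      rcases houter.1 r hres with ⟨h1, h2⟩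
      rw [hsort, ← h1]
      simp [List.isEmpty_iff, h2]
  | inr p =>
      have h1 := houter.2 p hres
      rw [hsort, ← h1]
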